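-- pv_equiv track=rewrite | github.com/tszala/aoc2018py | day5/day5.py | react_polymer_once
-- ===== SOURCE A (Python) =====
-- def react_polymer_once(polymer):
--     reacted_polymer = ''
--     previous = ''
--     current = ''
--     for i in range(len(polymer)):
--         current = polymer[i]
--         if previous == '':
--             previous=current
--             continue
--         if reacting(previous, current):
--             previous=''
--         else:
--             reacted_polymer += previous
--             previous=current
--
--     return reacted_polymer + previous
--
-- def reacting(a,b):
--     return abs(ord(a)-ord(b)) == 32
-- ===== SOURCE B (Python) =====
-- def react_polymer_once(polymer):
--     # stage 1: bitmap of reacting adjacent positions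
--     edges = [reacting(a, b) for a, b in zip(polymer, polymer[1:])]
--     # stage 2: greedy maximal matching on that bitmap: edge i is selected
--     # iff it reacts and edge i-1 was not selected
--     sel = []
--     prev = False
--     for e in edges:
--         prev = e and not prev
--         sel.append(prev)
--     # stage 3: keep the characters covered by no selected edge
--     return ''.join(c for c, r, l in zip(polymer, sel + [False], [False] + sel)
--                    if not r and not l)
--
-- def reacting(a, b):
--     return abs(ord(a) - ord(b)) == 32
-- ===== Notes on version B (the rewrite author's own statement) =====
-- stated objective: alternative
-- what changed: Replaces A's carried-pending-character single-pass state machine with three staged passes: build a bitmap of reacting adjacent positions, run the greedy matching recurrence sel[i] = edge[i] and not sel[i-1] over it, then filter out the characters covered by a selected edge.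
import Mathlib
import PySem

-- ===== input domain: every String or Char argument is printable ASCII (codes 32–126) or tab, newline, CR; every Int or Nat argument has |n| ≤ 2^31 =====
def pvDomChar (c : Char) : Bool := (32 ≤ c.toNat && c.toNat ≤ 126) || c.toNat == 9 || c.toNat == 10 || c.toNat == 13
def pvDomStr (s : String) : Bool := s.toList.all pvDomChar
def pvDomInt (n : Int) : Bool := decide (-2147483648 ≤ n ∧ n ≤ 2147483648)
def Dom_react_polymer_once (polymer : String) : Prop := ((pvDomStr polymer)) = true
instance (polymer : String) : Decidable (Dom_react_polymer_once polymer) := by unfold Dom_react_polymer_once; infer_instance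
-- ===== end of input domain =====

-- B replaces A's carried-pending-character state machine by three staged passes
-- (reaction-edge bitmap, greedy matching recurrence, covered-character filter);
-- same return value, no speed claim.

-- ===== PORT A =====
def reacting (a b : Char) : Bool := ((a.toNat : Int) - (b.toNat : Int)).natAbs == 32

-- A's loop state: (reacted_polymer, previous); previous = '' is `none`
def stepA (s : List Char × Option Char) (current : Char) : List Char × Option Char :=
  match s.2 with
  | none => (s.1, some current)            -- if previous == '': previous = current; continue
  | some previous =>
    if reacting previous current then (s.1, none)
    else (s.1 ++ [previous], some current)

def react_polymer_once (polymer : String) : String :=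
  let r := polymer.toList.foldl stepA ([], none)
  String.ofList (r.1 ++ r.2.toList)            -- reacted_polymer + previous

-- ===== PORT B =====
def reactingB (a b : Char) : Bool := ((a.toNat : Int) - (b.toNat : Int)).natAbs == 32

-- stage 2 loop: prev carried through, each selected bit appended
def selB : Bool → List Bool → List Bool
  | _, [] => []
  | prev, e :: es => (e && !prev) :: selB (e && !prev) es

-- stage 3: ''.join(c for c, r, l in zip(polymer, sel+[False], [False]+sel) if not r and not l)
def keepB : List Char → List Bool → List Bool → List Char
  | c :: cs, r :: rs, l :: ls => (if !r && !l then [c] else []) ++ keepB cs rs ls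
  | _, _, _ => []

def react_polymer_once_alt (polymer : String) : String :=
  let chars := polymer.toList
  let edges := List.zipWith reactingB chars chars.tail   -- zip(polymer, polymer[1:])
  let sel := selB false edges
  String.ofList (keepB chars (sel ++ [false]) (false :: sel))

-- ===== PRECONDITION & SPEC =====
def Spec_react_polymer_once (polymer : String) (out : String) : Prop := out = react_polymer_once_alt polymer
instance (polymer : String) (out : String) : Decidable (Spec_react_polymer_once polymer out) := by unfold Spec_react_polymer_once; infer_instance

-- ===== CLAIM (what is proved, stated in full; the proofs are below) =====
def Claim_equal_react_polymer_once : Prop := ∀ (polymer : String), Dom_react_polymer_once polymer → Spec_react_polymer_once polymer (react_polymer_once polymer)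

-- ===== LEMMAS AND PROOFS =====

-- proof-only reference function: greedy left-to-right pair skipping
def greedy : List Char → List Char
  | a :: b :: rest => if reacting a b then greedy rest else a :: greedy (b :: rest)
  | l => l

-- A's fold, started with no pending character, appends exactly greedy of the rest.
theorem foldA_eq_greedy (l : List Char) : ∀ (acc : List Char),
    (let r := l.foldl stepA (acc, none); r.1 ++ r.2.toList) = acc ++ greedy l := by
  induction l using greedy.induct with
  | case1 a b rest h ih =>
      intro acc
      simp only [List.foldl, stepA, h, if_true, greedy]
      simpa using ih acc
  | case2 a b rest h ih =>
      intro acc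
      have hb := ih (acc ++ [a])
      simp only [List.foldl, stepA] at hb ⊢
      rw [if_neg h]
      try simp only [List.foldl, stepA] at hb ⊢
      rw [greedy, if_neg h]
      simpa [List.append_assoc] using hb
  | case3 l h1 =>
      intro acc
      cases l with
      | nil => simp [greedy]
      | cons a t =>
        cases t with
        | nil => simp [List.foldl, stepA, greedy]
        | cons b r => exact absurd rfl (h1 a b r)

theorem reactingB_eq (a b : Char) : reactingB a b = reacting a b := rfl

-- B's three stages compute greedy.
theorem stages_eq_greedy (l : List Char) :
    keepB l (selB false (List.zipWith reactingB l l.tail) ++ [false])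
            (false :: selB false (List.zipWith reactingB l l.tail)) = greedy l := by
  induction l using greedy.induct with
  | case1 a b rest h ih =>
      cases rest with
      | nil =>
          simp [List.zipWith, selB, keepB, reactingB_eq, h, greedy]
      | cons c r2 =>
          rw [greedy, if_pos h]
          simp only [List.tail_cons, List.zipWith, selB, reactingB_eq, h]
          simpa [keepB] using ih
  | case2 a b rest h ih =>
      rw [greedy, if_neg h]
      simp only [List.tail_cons, List.zipWith, selB, reactingB_eq, h]
      simpa [keepB] using ih
  | case3 l h1 =>
      cases l with
      | nil => simp [keepB, greedy]
      | cons a t =>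
        cases t with
        | nil => simp [selB, keepB, greedy]
        | cons b r => exact absurd rfl (h1 a b r)

-- ===== VERDICT (by name: the statement is the Claim_ definition above) =====
theorem react_polymer_once_spec : Claim_equal_react_polymer_once := by
  intro polymer _
  unfold Spec_react_polymer_once react_polymer_once react_polymer_once_alt
  have hA := foldA_eq_greedy polymer.toList []
  simp at hA
  simp [hA, stages_eq_greedy]
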